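-- pv_equiv track=rewrite | github.com/onewns/TIL | algorithm/Greedy/PG_호텔방배정.py | solution
-- ===== SOURCE A (Python) =====
-- def solution(k, room_number):
--     answer = []
--     nodes = {}
--     for room in room_number:
--         if room not in nodes:
--             answer.append(room)
--             nodes[room] = room + 1
--
--         else:
--             temp = [room]
--             cur = room
--             while True:
--                 next_room = nodes[cur]
--                 if next_room not in nodes:
--                     answer.append(next_room)
--                     temp.append(next_room)
--                     break
--                 temp.append(next_room)
--                 cur = next_room
--             for k in temp:
--                 nodes[k] = next_room + 1
--
--     return answer
-- ===== SOURCE B (Python) =====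
-- def solution(k, room_number):
--     nodes = {}
--
--     def assign(x):
--         if x not in nodes:
--             nodes[x] = x + 1
--             return x
--         r = assign(nodes[x])
--         nodes[x] = r + 1
--         return r
--
--     return [assign(room) for room in room_number]
-- ===== Notes on version B (the rewrite author's own statement) =====
-- stated objective: simpler
-- what changed: The while-True chain walk with an explicit temp list and a separate rewrite loop is replaced by a recursive union-find find with path compression performed on the way back, and the answer list by a comprehension over that helper.
import Mathlib
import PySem

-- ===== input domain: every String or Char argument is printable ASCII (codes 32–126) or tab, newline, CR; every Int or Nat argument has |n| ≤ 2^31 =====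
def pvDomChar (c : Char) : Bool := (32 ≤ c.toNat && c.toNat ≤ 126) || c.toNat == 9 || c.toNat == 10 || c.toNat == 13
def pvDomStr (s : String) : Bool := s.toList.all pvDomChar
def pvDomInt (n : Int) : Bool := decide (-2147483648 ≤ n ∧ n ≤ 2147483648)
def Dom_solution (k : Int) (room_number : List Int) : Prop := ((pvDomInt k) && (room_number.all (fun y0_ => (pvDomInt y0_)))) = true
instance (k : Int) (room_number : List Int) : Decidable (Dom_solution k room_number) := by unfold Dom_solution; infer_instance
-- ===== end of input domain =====

-- B replaces A's while-loop + temp-list + rewrite pass by a recursive find with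
-- path compression on the way back (objective: simpler).  Both ports use a fuel
-- counter (dict size + 1) purely as a totality guard for the chain walk.

-- ===== PORT A =====
-- the while True loop: follow nodes[cur] until a value not in nodes; temp collects visited rooms
def chaseA (nodes : PySem.Dict Int Int) : Nat → Int → List Int → Int × List Int
  | 0, cur, temp => (cur, temp)            -- fuel guard only; never reached from solution
  | f + 1, cur, temp =>
    match nodes.get? cur with
    | none => (cur, temp)                  -- Python's nodes[cur] KeyError; never reached from solution
    | some next_room =>
      if nodes.contains next_room then chaseA nodes f next_room (temp ++ [next_room])
      else (next_room, temp ++ [next_room])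

-- one iteration of A's `for room in room_number` over the state (answer, nodes)
def stepA (st : List Int × PySem.Dict Int Int) (room : Int) : List Int × PySem.Dict Int Int :=
  let answer := st.1
  let nodes := st.2
  if ¬ nodes.contains room then (answer ++ [room], nodes.insert room (room + 1))
  else
    let res := chaseA nodes (nodes.items.length + 1) room [room]
    (answer ++ [res.1], res.2.foldl (fun d kk => d.insert kk (res.1 + 1)) nodes)

def solution (k : Int) (room_number : List Int) : List Int :=
  (room_number.foldl stepA ([], PySem.Dict.empty)).1

-- ===== PORT B =====
-- recursive `assign(x)`: if x free, claim it and point it to x+1; else recurse on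
-- nodes[x] and compress x to r+1 on the way back.  Fuel = totality guard only.
def assignB : Nat → PySem.Dict Int Int → Int → Int × PySem.Dict Int Int
  | 0, nodes, x => (x, nodes)              -- fuel guard only; never reached from solution_alt
  | f + 1, nodes, x =>
    match nodes.get? x with
    | none => (x, nodes.insert x (x + 1))
    | some nxt =>
      let res := assignB f nodes nxt
      (res.1, res.2.insert x (res.1 + 1))

def solution_alt (k : Int) (room_number : List Int) : List Int :=
  (room_number.foldl
    (fun st room =>
      let res := assignB (st.2.items.length + 1) st.2 room
      (st.1 ++ [res.1], res.2))
    ([], PySem.Dict.empty)).1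

-- ===== PRECONDITION & SPEC =====
def Spec_solution (k : Int) (room_number : List Int) (out : List Int) : Prop := out = solution_alt k room_number
instance (k : Int) (room_number : List Int) (out : List Int) : Decidable (Spec_solution k room_number out) := by unfold Spec_solution; infer_instance

-- ===== CLAIM (what is proved, stated in full; the proofs are below) =====
def Claim_equal_solution : Prop := ∀ (k : Int) (room_number : List Int), Dom_solution k room_number → Spec_solution k room_number (solution k room_number)
-- ===== LEMMAS AND PROOFS =====

-- all values in the dict strictly exceed their keys (rooms always point past themselves)
def pvVals (d : PySem.Dict Int Int) : Prop := ∀ p ∈ d.items, p.1 < p.2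

-- number of keys ≥ x: an upper bound on the chain length starting at x
def pvCnt (d : PySem.Dict Int Int) (x : Int) : Nat :=
  (d.keys.filter (fun kk => decide (x ≤ kk))).length

theorem pv_insert_comm (d : PySem.Dict Int Int) (a b v w : Int)
    (ha : d.contains a = true) (hne : a ≠ b) :
    (d.insert b w).insert a v = (d.insert a v).insert b w := by
  apply PySem.Dict.ext
  by_cases hb : d.contains b = true
  · have ha' : (d.insert b w).contains a = true := by
      rw [PySem.Dict.contains_insert]; simp [ha]
    have hb' : (d.insert a v).contains b = true := by
      rw [PySem.Dict.contains_insert]; simp [hb]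
    rw [PySem.Dict.items_insert_of_contains _ _ ha', PySem.Dict.items_insert_of_contains _ _ hb',
        PySem.Dict.items_insert_of_contains _ _ ha, PySem.Dict.items_insert_of_contains _ _ hb,
        List.map_map, List.map_map]
    apply List.map_congr_left
    intro p _
    by_cases hpb : p.1 = b <;> by_cases hpa : p.1 = a <;>
      simp_all [Function.comp, Ne.symm hne]
  · have hb0 : d.contains b = false := by simpa using hb
    have ha' : (d.insert b w).contains a = true := by
      rw [PySem.Dict.contains_insert]; simp [ha]
    have hb' : (d.insert a v).contains b = false := by
      rw [PySem.Dict.contains_insert]; simp [hb0, Ne.symm hne]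
    rw [PySem.Dict.items_insert_of_contains _ _ ha',
        PySem.Dict.items_insert_of_not_contains _ _ hb',
        PySem.Dict.items_insert_of_not_contains _ _ hb0,
        PySem.Dict.items_insert_of_contains _ _ ha, List.map_append]
    simp [Ne.symm hne]

theorem pv_foldl_insert_comm (T : List Int) (v x : Int) :
    ∀ d : PySem.Dict Int Int, d.contains x = true → (∀ y ∈ T, x ≠ y) →
    T.foldl (fun dd kk => dd.insert kk v) (d.insert x v) =
      (T.foldl (fun dd kk => dd.insert kk v) d).insert x v := by
  induction T with
  | nil => intro d _ _; rfl
  | cons y T ih =>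
    intro d hx hT
    simp only [List.foldl_cons]
    rw [← pv_insert_comm d x y v v hx (hT y (by simp))]
    exact ih (d.insert y v) (by rw [PySem.Dict.contains_insert]; simp [hx])
      (fun z hz => hT z (by simp [hz]))

theorem pv_chase_temp (d : PySem.Dict Int Int) :
    ∀ (f : Nat) (cur : Int) (t1 t2 : List Int),
      chaseA d f cur (t1 ++ t2) = ((chaseA d f cur t2).1, t1 ++ (chaseA d f cur t2).2) := by
  intro f
  induction f with
  | zero => intro cur t1 t2; rfl
  | succ f ih =>
    intro cur t1 t2
    cases h : d.get? cur with
    | none => simp only [chaseA, h]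
    | some nxt =>
      by_cases hc : d.contains nxt = true
      · simp only [chaseA, h, hc, if_true, List.append_assoc]
        exact ih nxt t1 (t2 ++ [nxt])
      · simp [chaseA, h, hc, List.append_assoc]

theorem pv_chase_mem (d : PySem.Dict Int Int) (hv : pvVals d) :
    ∀ (f : Nat) (cur : Int) (temp : List Int) (y : Int),
      y ∈ (chaseA d f cur temp).2 → y ∈ temp ∨ cur < y := by
  intro f
  induction f with
  | zero => intro cur temp y hy; exact Or.inl hy
  | succ f ih =>
    intro cur temp y hy
    cases h : d.get? cur with
    | none => simp only [chaseA, h] at hy; exact Or.inl hy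
    | some nxt =>
      simp only [chaseA, h] at hy
      have hlt : cur < nxt := hv (cur, nxt) (PySem.Dict.mem_items_of_get?_eq_some d h)
      by_cases hc : d.contains nxt = true
      · rw [if_pos hc] at hy
        rcases ih nxt (temp ++ [nxt]) y hy with hm | hl
        · rcases List.mem_append.mp hm with hm | hm
          · exact Or.inl hm
          · simp at hm; subst hm; exact Or.inr hlt
        · exact Or.inr (lt_trans hlt hl)
      · rw [if_neg hc] at hy
        rcases List.mem_append.mp hy with hm | hm
        · exact Or.inl hm
        · simp at hm; subst hm; exact Or.inr hlt

theorem pv_cnt_pos (d : PySem.Dict Int Int) (x : Int) (hx : x ∈ d.keys) : 1 ≤ pvCnt d x := by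
  have hmem : x ∈ d.keys.filter (fun kk => decide (x ≤ kk)) :=
    List.mem_filter.mpr ⟨hx, by simp⟩
  exact List.length_pos_of_mem hmem

theorem pv_cnt_lt (d : PySem.Dict Int Int) (x y : Int) (hx : x ∈ d.keys) (hxy : x < y) :
    pvCnt d y < pvCnt d x := by
  obtain ⟨l1, l2, h⟩ := List.append_of_mem hx
  have m1 : (l1.filter (fun kk => decide (y ≤ kk))).length ≤ (l1.filter (fun kk => decide (x ≤ kk))).length := by
    simp only [← List.countP_eq_length_filter]
    exact List.countP_mono_left (fun a _ ha => by simp at ha ⊢; omega)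
  have m2 : (l2.filter (fun kk => decide (y ≤ kk))).length ≤ (l2.filter (fun kk => decide (x ≤ kk))).length := by
    simp only [← List.countP_eq_length_filter]
    exact List.countP_mono_left (fun a _ ha => by simp at ha ⊢; omega)
  have hyx : ¬ (y ≤ x) := by omega
  simp only [pvCnt, h, List.filter_append, List.filter_cons, decide_eq_true_eq, hyx, if_false,
    le_refl, decide_true, if_true, List.length_append, List.length_cons]
  omega

theorem pv_cnt_le (d : PySem.Dict Int Int) (x : Int) : pvCnt d x ≤ d.items.length := by
  have h1 : (d.keys.filter (fun kk => decide (x ≤ kk))).length ≤ d.keys.length :=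
    List.length_filter_le _ _
  have h2 : d.keys.length = d.items.length := by
    show (d.items.map Prod.fst).length = d.items.length
    simp
  simpa [pvCnt, h2] using h1

theorem pv_assign_inv : ∀ (f : Nat) (d : PySem.Dict Int Int) (x : Int),
    pvVals d → d.keys.Nodup →
    pvVals (assignB f d x).2 ∧ (assignB f d x).2.keys.Nodup ∧ x ≤ (assignB f d x).1 := by
  intro f
  induction f with
  | zero => intro d x hv hn; exact ⟨hv, hn, le_refl x⟩
  | succ f ih =>
    intro d x hv hn
    cases h : d.get? x with
    | none =>
      simp only [assignB, h]
      refine ⟨?_, PySem.Dict.nodup_keys_insert d x (x + 1) hn, le_refl x⟩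
      intro p hp
      rcases (PySem.Dict.mem_items_insert d x (x + 1) p).mp hp with rfl | ⟨hp, _⟩
      · omega
      · exact hv p hp
    | some nxt =>
      simp only [assignB, h]
      have hxn : x < nxt := hv (x, nxt) (PySem.Dict.mem_items_of_get?_eq_some d h)
      obtain ⟨hv', hn', hle⟩ := ih d nxt hv hn
      refine ⟨?_, PySem.Dict.nodup_keys_insert _ x _ hn', by omega⟩
      intro p hp
      rcases (PySem.Dict.mem_items_insert _ x _ p).mp hp with rfl | ⟨hp, _⟩
      · simp; omega
      · exact hv' p hp

theorem pv_main : ∀ (f g : Nat) (d : PySem.Dict Int Int) (x : Int),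
    pvVals d → pvCnt d x < f → pvCnt d x < g →
    assignB f d x =
      (if ¬ d.contains x then (x, d.insert x (x + 1))
       else ((chaseA d g x [x]).1,
             (chaseA d g x [x]).2.foldl
               (fun dd kk => dd.insert kk ((chaseA d g x [x]).1 + 1)) d)) := by
  intro f
  induction f with
  | zero => intro g d x _ hf _; exact absurd hf (Nat.not_lt_zero _)
  | succ f ih =>
    intro g d x hv hf hg
    cases hx : d.get? x with
    | none =>
      have hc : d.contains x = false := by
        rw [PySem.Dict.contains_eq_isSome_get?, hx]; rfl
      simp only [assignB, hx, hc]
      simp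
    | some nxt =>
      have hcx : d.contains x = true := by
        rw [PySem.Dict.contains_eq_isSome_get?, hx]; rfl
      have hmemx : x ∈ d.keys := by
        by_contra hxx
        rw [← PySem.Dict.get?_eq_none_iff_not_mem_keys] at hxx
        rw [hx] at hxx; cases hxx
      have hxn : x < nxt := hv (x, nxt) (PySem.Dict.mem_items_of_get?_eq_some d hx)
      have hpos : 1 ≤ pvCnt d x := pv_cnt_pos d x hmemx
      have hcnt : pvCnt d nxt < pvCnt d x := pv_cnt_lt d x nxt hmemx hxn
      cases g with
      | zero => omega
      | succ g =>
        rw [if_neg (by simp [hcx])]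
        have hch : chaseA d (g + 1) x [x]
            = if d.contains nxt = true then chaseA d g nxt ([x] ++ [nxt])
              else (nxt, [x] ++ [nxt]) := by
          simp only [chaseA]
          rw [hx]
        by_cases hcn : d.contains nxt = true
        · have htmp := pv_chase_temp d g nxt [x] [nxt]
          rw [if_pos hcn] at hch
          rw [htmp] at hch
          have ihv := ih g d nxt hv (by omega) (by omega)
          rw [if_neg (by simp [hcn])] at ihv
          simp only [assignB, hx, ihv, hch, List.singleton_append, List.foldl_cons]
          rw [pv_foldl_insert_comm _ _ x d hcx]
          intro y hy
          rcases pv_chase_mem d hv g nxt [nxt] y hy with hm | hl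
          · simp at hm; omega
          · omega
        · have hgn : d.get? nxt = none := by
            cases hq : d.get? nxt with
            | none => rfl
            | some z =>
              exfalso; apply hcn
              rw [PySem.Dict.contains_eq_isSome_get?, hq]; rfl
          cases f with
          | zero => omega
          | succ f' =>
            rw [if_neg hcn] at hch
            simp only [assignB, hx, hgn, hch, List.singleton_append, List.foldl_cons,
              List.foldl_nil]
            rw [pv_insert_comm d x nxt (nxt + 1) (nxt + 1) hcx (by omega)]

theorem pv_fold_eq : ∀ (l : List Int) (ans : List Int) (d : PySem.Dict Int Int),
    pvVals d → d.keys.Nodup →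
    l.foldl stepA (ans, d) =
      l.foldl (fun st room =>
        (st.1 ++ [(assignB (st.2.items.length + 1) st.2 room).1],
         (assignB (st.2.items.length + 1) st.2 room).2)) (ans, d) := by
  intro l
  induction l with
  | nil => intro ans d _ _; rfl
  | cons room l ih =>
    intro ans d hv hn
    have hfu : pvCnt d room < d.items.length + 1 := by
      have := pv_cnt_le d room; omega
    have hm := pv_main (d.items.length + 1) (d.items.length + 1) d room hv hfu hfu
    have hstep : stepA (ans, d) room =
        (ans ++ [(assignB (d.items.length + 1) d room).1],
         (assignB (d.items.length + 1) d room).2) := by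
      by_cases hc : d.contains room = true
      · simp [stepA, hm, hc]
      · have hc0 : d.contains room = false := by simpa using hc
        simp [stepA, hm, hc0]
    obtain ⟨hv', hn', _⟩ :=
      pv_assign_inv (d.items.length + 1) d room hv hn
    simp only [List.foldl_cons, hstep]
    exact ih _ _ hv' hn'

-- ===== VERDICT (by name: the statement is the Claim_ definition above) =====
theorem solution_spec : Claim_equal_solution := by
  intro k rn _
  unfold Spec_solution solution solution_alt
  rw [pv_fold_eq rn [] PySem.Dict.empty (by intro p hp; simp [PySem.Dict.empty] at hp) (by simp [PySem.Dict.empty, PySem.Dict.keys])]
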